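-- pv_equiv track=rewrite | github.com/ubercareerprep2021/Uber-Career-Prep-Homework-Gabriel-Silva | Assignment-3/sorting_exercises/ex5_peaks_and_valleys.py | sort_peaks_and_valleys
-- ===== SOURCE A (Python) =====
-- def sort_peaks_and_valleys(array: list):
--     aux_array = [array[0]]
--     index_aux = 0
--     array_to_delete = array[1:]
--
--     # while there are elements to compare
--     while len(array_to_delete) > 0:
--         max_difference = 0
--         # search for element with the biggest diference from the last ordered element
--         for element in array_to_delete:
--             absolute_diference = abs(aux_array[index_aux] - element)
--             if absolute_diference > max_difference:
--                 max_difference = absolute_diference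
--                 element_to_append = element
--
--         aux_array.append(element_to_append)
--         index_aux += 1
--         array_to_delete.remove(element_to_append)
--
--     return aux_array
-- ===== SOURCE B (Python) =====
-- def sort_peaks_and_valleys(array: list):
--     # Greedy "farthest from last" always picks the remaining min or max value,
--     # and after the first pick it strictly alternates min/max.  So: sort the
--     # tail once, choose the first end by distance (tie: earliest original
--     # position), then interleave the two ends of the sorted tail.
--     rest = array[1:]
--     t = sorted(rest)
--     out = [array[0]]
--     if not t:
--         return out
--     last = array[0]
--     dlo = abs(last - t[0])
--     dhi = abs(last - t[-1])
--     lo_first = dlo > dhi or (dlo == dhi and rest.index(t[0]) <= rest.index(t[-1]))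
--     i, j = 0, len(t) - 1
--     while i <= j:
--         if lo_first:
--             out.append(t[i])
--             i += 1
--         else:
--             out.append(t[j])
--             j -= 1
--         lo_first = not lo_first
--     return out
-- ===== Notes on version B (the rewrite author's own statement) =====
-- stated objective: faster
-- what changed: Replaces the quadratic scan-and-remove greedy with one sort of the tail plus a two-pointer interleave of its ends (the farthest element is always the remaining min or max, and after the first pick strictly alternates), tie-breaking the first pick by earliest original position.
import Mathlib
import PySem

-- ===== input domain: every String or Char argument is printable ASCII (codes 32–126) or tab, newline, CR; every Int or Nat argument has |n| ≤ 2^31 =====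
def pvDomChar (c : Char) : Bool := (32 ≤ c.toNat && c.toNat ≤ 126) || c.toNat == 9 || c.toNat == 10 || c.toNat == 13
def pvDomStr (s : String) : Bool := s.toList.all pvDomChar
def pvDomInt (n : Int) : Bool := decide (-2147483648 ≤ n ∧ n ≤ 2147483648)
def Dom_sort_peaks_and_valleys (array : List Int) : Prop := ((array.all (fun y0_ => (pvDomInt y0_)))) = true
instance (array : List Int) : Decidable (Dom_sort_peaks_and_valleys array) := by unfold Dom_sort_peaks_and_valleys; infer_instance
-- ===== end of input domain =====

-- B replaces A's quadratic scan-and-remove greedy by one sort of the tail plus a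
-- two-pointer interleave of its ends (objective: faster, O(n log n) vs O(n^2)).

-- ===== PORT A =====
-- inner 'for element in array_to_delete' loop: state = (max_difference, element_to_append);
-- element_to_append persists across while-iterations, hence the Option carried in.
def pvAScan (last : Int) (st : Int × Option Int) (l : List Int) : Int × Option Int :=
  l.foldl (fun st e => if |last - e| > st.1 then (|last - e|, some e) else st) st

-- the 'while len(array_to_delete) > 0' loop; fuel = initial length (each pass removes one element)
def pvALoop : Nat → List Int → Int → Option Int → List Int
  | 0, _, _, _ => []
  | fuel+1, rem, last, prev =>
    if 0 < rem.length then
      match (pvAScan last (0, prev) rem).2 with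
      | none => []          -- Python: UnboundLocalError on element_to_append (outside Pre_)
      | some e =>
        match PySem.List.remove? rem e with
        | none => []        -- Python: ValueError from list.remove (unreachable here)
        | some rem' => e :: pvALoop fuel rem' e (some e)
    else []

def sort_peaks_and_valleys (array : List Int) : List Int :=
  match array with
  | [] => []                -- Python: IndexError on array[0] (outside Pre_)
  | h :: t => h :: pvALoop t.length t h none

-- ===== PORT B =====
-- the 'while i <= j' two-pointer loop of Source B; fuel = len(t) bounds the iteration count
def pvBLoop (t : List Int) : Nat → Int → Int → Bool → List Int
  | 0, _, _, _ => []
  | fuel+1, i, j, loFirst =>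
    if i ≤ j then
      if loFirst then
        match PySem.List.pyGet? t i with
        | some v => v :: pvBLoop t fuel (i+1) j false
        | none => []          -- unreachable: 0 ≤ i ≤ j < len(t)
      else
        match PySem.List.pyGet? t j with
        | some v => v :: pvBLoop t fuel i (j-1) true
        | none => []
    else []

def sort_peaks_and_valleys_alt (array : List Int) : List Int :=
  match array with
  | [] => []                -- Source B: IndexError on array[0] (outside Pre_)
  | a0 :: rest =>
    let t := PySem.List.sorted rest (fun x => x) false
    if t = [] then [a0]
    else
      let vlo := t.headI          -- t[0], t nonempty
      let vhi := t.getLastD 0     -- t[-1], t nonempty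
      let dlo := |a0 - vlo|
      let dhi := |a0 - vhi|
      -- rest.index(t[0]) <= rest.index(t[-1]); both are members of rest, so index? is some
      let loFirst : Bool :=
        (dhi < dlo) || ((dlo == dhi) &&
          decide (((PySem.List.index? rest vlo).getD 0) ≤ ((PySem.List.index? rest vhi).getD 0)))
      a0 :: pvBLoop t t.length 0 ((t.length : Int) - 1) loFirst

-- ===== PRECONDITION & SPEC =====
-- Pre_ excludes only inputs where A raises: the empty list (IndexError on array[0]) and
-- non-empty lists whose tail is entirely equal to the head (UnboundLocalError:
-- max_difference never exceeds 0 on the first while-pass, so element_to_append is unbound).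
def Pre_sort_peaks_and_valleys (array : List Int) : Prop :=
  array ≠ [] ∧ (array.tail = [] ∨ ∃ x ∈ array.tail, x ≠ array.headI)
instance (array : List Int) : Decidable (Pre_sort_peaks_and_valleys array) := by
  unfold Pre_sort_peaks_and_valleys; infer_instance
def pvWitness_sort_peaks_and_valleys : List Int := [5, 1, 5]

def Spec_sort_peaks_and_valleys (array : List Int) (out : List Int) : Prop := out = sort_peaks_and_valleys_alt array
instance (array : List Int) (out : List Int) : Decidable (Spec_sort_peaks_and_valleys array out) := by unfold Spec_sort_peaks_and_valleys; infer_instance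

-- ===== CLAIM (what is proved, stated in full; the proofs are below) =====
def Claim_equal_sort_peaks_and_valleys : Prop := ∀ (array : List Int), Dom_sort_peaks_and_valleys array → Pre_sort_peaks_and_valleys array → Spec_sort_peaks_and_valleys array (sort_peaks_and_valleys array)

-- ===== LEMMAS AND PROOFS =====

-- the abstract "interleave the two ends" recursion both loops are reduced to
def pvIlv : List Int → Bool → List Int
  | [], _ => []
  | h :: s, true => h :: pvIlv s false
  | h :: s, false => (h :: s).getLastD 0 :: pvIlv ((h :: s).dropLast) true
termination_by seg _ => seg.length
decreasing_by all_goals (simp only [List.length_dropLast, List.length_cons]; omega)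

theorem pvIlv_false_eq (seg : List Int) (h : seg ≠ []) :
    pvIlv seg false = seg.getLastD 0 :: pvIlv seg.dropLast true := by
  cases seg with
  | nil => exact absurd rfl h
  | cons a s => simp [pvIlv]

theorem pvGetLastD_irrel : ∀ (l : List Int) (d d' : Int), l ≠ [] → l.getLastD d = l.getLastD d' := by
  intro l d d' h
  cases l with
  | nil => exact absurd rfl h
  | cons a s => simp only [List.getLastD_cons]

theorem pvGetLastD_mem : ∀ (l : List Int), l ≠ [] → l.getLastD 0 ∈ l := by
  intro l
  induction l with
  | nil => intro h; exact absurd rfl h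
  | cons a s ih =>
    intro _
    cases s with
    | nil => simp
    | cons b s' =>
      have := ih (by simp)
      rw [List.getLastD_cons, pvGetLastD_irrel (b :: s') a 0 (by simp)]
      exact List.mem_cons_of_mem a this

theorem pvPw_le_last : ∀ (l : List Int), l.Pairwise (· ≤ ·) → ∀ x ∈ l, x ≤ l.getLastD 0 := by
  intro l
  induction l with
  | nil => intro _ x hx; simp at hx
  | cons a s ih =>
    intro hpw x hx
    rcases List.pairwise_cons.mp hpw with ⟨ha, hs⟩
    cases s with
    | nil => simp at hx; simp [hx]
    | cons b s' =>
      rw [List.getLastD_cons, pvGetLastD_irrel (b :: s') a 0 (by simp)]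
      rcases List.mem_cons.mp hx with rfl | hx'
      · exact le_trans (ha _ (List.mem_cons_self)) (ih hs _ (List.mem_cons_self))
      · exact ih hs x hx'

theorem pvDropLast_concat : ∀ (l : List Int), l ≠ [] → l.dropLast ++ [l.getLastD 0] = l := by
  intro l
  induction l with
  | nil => intro h; exact absurd rfl h
  | cons a s ih =>
    intro _
    cases s with
    | nil => rfl
    | cons b s' =>
      rw [List.getLastD_cons, pvGetLastD_irrel (b :: s') a 0 (by simp),
        List.dropLast_cons₂, List.cons_append, ih (by simp)]

theorem pvTake_succ_last : ∀ (l : List Int) (k : Nat) (hk : k < l.length),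
    (l.take (k + 1)).getLastD 0 = l[k] := by
  intro l
  induction l with
  | nil => intro k hk; simp at hk
  | cons a s ih =>
    intro k hk
    cases k with
    | zero => rfl
    | succ k' =>
      have hk' : k' < s.length := by simpa using hk
      have hne : s.take (k' + 1) ≠ [] := by
        intro h
        rcases List.take_eq_nil_iff.mp h with h' | h'
        · omega
        · subst h'; simp at hk'
      rw [List.take_succ_cons, List.getLastD_cons, pvGetLastD_irrel _ a 0 hne]
      simpa using ih k' hk'

theorem pvTake_succ_dropLast : ∀ (l : List Int) (k : Nat), k < l.length →
    (l.take (k + 1)).dropLast = l.take k := by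
  intro l
  induction l with
  | nil => intro k hk; simp at hk
  | cons a s ih =>
    intro k hk
    cases k with
    | zero => rfl
    | succ k' =>
      have hk' : k' < s.length := by simpa using hk
      have hne : s.take (k' + 1) ≠ [] := by
        intro h
        rcases List.take_eq_nil_iff.mp h with h' | h'
        · omega
        · subst h'; simp at hk'
      rw [List.take_succ_cons, List.take_succ_cons, List.dropLast_cons_of_ne_nil hne, ih k' hk']

theorem pvBLoop_eq_ilv : ∀ (fuel : Nat) (t : List Int) (i j : Int) (b : Bool),
    0 ≤ i → j < t.length → (j + 1 - i).toNat ≤ fuel →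
    pvBLoop t fuel i j b = pvIlv ((t.drop i.toNat).take (j + 1 - i).toNat) b := by
  intro fuel
  induction fuel with
  | zero =>
    intro t i j b h0 hj hk
    have hseg : (j + 1 - i).toNat = 0 := by omega
    simp [pvBLoop, hseg, pvIlv]
  | succ fuel ih =>
    intro t i j b h0 hj hk
    by_cases hij : i ≤ j
    · have hilen : i.toNat < t.length := by omega
      have hjlen : j.toNat < t.length := by omega
      have hseg : (j + 1 - i).toNat = (j - i).toNat + 1 := by omega
      have hdlen : (j - i).toNat < (t.drop i.toNat).length := by
        simp [List.length_drop]; omega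
      cases b with
      | true =>
        have hgi : PySem.List.pyGet? t i = some t[i.toNat] :=
          PySem.List.pyGet?_eq_some_getElem t h0 (by omega)
        rw [pvBLoop]
        rw [if_pos hij, if_pos rfl, hgi]
        rw [ih t (i + 1) j false (by omega) hj (by omega)]
        rw [hseg, List.drop_eq_getElem_cons hilen, List.take_succ_cons]
        have e1 : (i + 1).toNat = i.toNat + 1 := by omega
        have e2 : (j + 1 - (i + 1)).toNat = (j - i).toNat := by omega
        rw [e1, e2]
        simp [pvIlv]
      | false =>
        have hgj : PySem.List.pyGet? t j = some t[j.toNat] :=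
          PySem.List.pyGet?_eq_some_getElem t (by omega) (by omega)
        rw [pvBLoop]
        rw [if_pos hij, if_neg Bool.false_ne_true, hgj]
        rw [ih t i (j - 1) true h0 (by omega) (by omega)]
        rw [hseg]
        have hlast : ((t.drop i.toNat).take ((j - i).toNat + 1)).getLastD 0 = t[j.toNat] := by
          rw [pvTake_succ_last _ _ hdlen, List.getElem_drop]
          congr 1
          omega
        have hdrop : ((t.drop i.toNat).take ((j - i).toNat + 1)).dropLast
            = (t.drop i.toNat).take (j - i).toNat := pvTake_succ_dropLast _ _ hdlen
        have hne : (t.drop i.toNat).take ((j - i).toNat + 1) ≠ [] := by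
          intro h
          rcases List.take_eq_nil_iff.mp h with h' | h'
          · omega
          · rw [h'] at hdlen; simp at hdlen
        rw [pvIlv_false_eq _ hne, hlast, hdrop]
        have e2 : (j - 1 + 1 - i).toNat = (j - i).toNat := by omega
        rw [e2]
    · have hseg : (j + 1 - i).toNat = 0 := by omega
      rw [pvBLoop]
      simp [if_neg hij, hseg, pvIlv]

-- scan fold: nothing strictly improves the register
theorem pvScan_all_le (p : Int) : ∀ (l : List Int) (b : Int) (cur : Option Int),
    (∀ e ∈ l, |p - e| ≤ b) →
    l.foldl (fun st e => if |p - e| > st.1 then (|p - e|, some e) else st) (b, cur) = (b, cur) := by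
  intro l
  induction l with
  | nil => intro b cur _; rfl
  | cons a s ih =>
    intro b cur h
    have ha : ¬ (|p - a| > b) := not_lt.mpr (h a (List.mem_cons_self))
    simp only [List.foldl_cons, if_neg ha]
    exact ih b cur (fun e he => h e (List.mem_cons_of_mem a he))

-- scan fold: the register ends at the first achiever of the maximal difference D
theorem pvScan_find (p D : Int) : ∀ (l : List Int) (b : Int) (cur : Option Int),
    b < D → (∀ e ∈ l, |p - e| ≤ D) → (∃ e ∈ l, |p - e| = D) →
    l.foldl (fun st e => if |p - e| > st.1 then (|p - e|, some e) else st) (b, cur)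
      = (D, l.find? (fun e => |p - e| == D)) := by
  intro l
  induction l with
  | nil =>
    intro b cur _ _ hex
    rcases hex with ⟨e, he, _⟩
    simp at he
  | cons a s ih =>
    intro b cur hb hle hex
    by_cases ha : |p - a| = D
    · simp only [List.foldl_cons, if_pos (by omega : |p - a| > b)]
      rw [List.find?_cons_of_pos (by simp [ha]), ha]
      exact pvScan_all_le p s D (some a) (fun e he => hle e (List.mem_cons_of_mem a he))
    · have haD : |p - a| < D := lt_of_le_of_ne (hle a (List.mem_cons_self)) ha
      have hex' : ∃ e ∈ s, |p - e| = D := by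
        rcases hex with ⟨e, he, heD⟩
        rcases List.mem_cons.mp he with rfl | he'
        · exact absurd heD ha
        · exact ⟨e, he', heD⟩
      simp only [List.foldl_cons]
      rw [List.find?_cons_of_neg (by simp [ha])]
      by_cases hab : |p - a| > b
      · simp only [if_pos hab]
        exact ih |p - a| (some a) haD (fun e he => hle e (List.mem_cons_of_mem a he)) hex'
      · simp only [if_neg hab]
        exact ih b cur hb (fun e he => hle e (List.mem_cons_of_mem a he)) hex'

theorem pvFind_self (a : Int) : ∀ (l : List Int), a ∈ l → l.find? (fun e => e == a) = some a := by
  intro l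
  induction l with
  | nil => intro h; simp at h
  | cons x s ih =>
    intro h
    by_cases hx : x = a
    · rw [List.find?_cons_of_pos (by simp [hx])]
      rw [hx]
    · rw [List.find?_cons_of_neg (by simp [hx])]
      refine ih ?_
      rcases List.mem_cons.mp h with rfl | h'
      · exact absurd rfl hx
      · exact h'

theorem pvFind_congr {p q : Int → Bool} : ∀ (l : List Int), (∀ e ∈ l, p e = q e) →
    l.find? p = l.find? q := by
  intro l
  induction l with
  | nil => intro _; rfl
  | cons a s ih =>
    intro h
    by_cases hpa : p a = true
    · rw [List.find?_cons_of_pos hpa, List.find?_cons_of_pos (by rw [← h a List.mem_cons_self]; exact hpa)]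
    · rw [List.find?_cons_of_neg hpa, List.find?_cons_of_neg (by rw [← h a List.mem_cons_self]; exact hpa)]
      exact ih (fun e he => h e (List.mem_cons_of_mem a he))

theorem pvFind_two (a b' : Int) (hne : a ≠ b') : ∀ (l : List Int) (ka kb : Nat),
    PySem.List.index? l a = some ka → PySem.List.index? l b' = some kb →
    l.find? (fun e => e == a || e == b') = some (if ka ≤ kb then a else b') := by
  intro l
  induction l with
  | nil =>
    intro ka kb hka _
    have h1 : a ∈ ([] : List Int) :=
      (PySem.List.index?_isSome_iff [] a).mp (by rw [hka]; rfl)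
    simp at h1
  | cons x s ih =>
    intro ka kb hka hkb
    by_cases hxa : x = a
    · subst hxa
      rw [PySem.List.index?_cons_self] at hka
      have hka0 : ka = 0 := by injection hka with h; omega
      rw [List.find?_cons_of_pos (by simp)]
      rw [hka0, if_pos (Nat.zero_le kb)]
    · by_cases hxb : x = b'
      · subst hxb
        rw [PySem.List.index?_cons_self] at hkb
        have hkb0 : kb = 0 := by injection hkb with h; omega
        rw [PySem.List.index?_cons_of_ne s (Ne.symm hne)] at hka
        obtain ⟨ka', _, hka2⟩ := Option.map_eq_some_iff.mp hka
        rw [List.find?_cons_of_pos (by simp)]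
        rw [hkb0, if_neg (by omega)]
      · rw [PySem.List.index?_cons_of_ne s hxa] at hka
        rw [PySem.List.index?_cons_of_ne s hxb] at hkb
        obtain ⟨ka', hka', hka2⟩ := Option.map_eq_some_iff.mp hka
        obtain ⟨kb', hkb', hkb2⟩ := Option.map_eq_some_iff.mp hkb
        rw [List.find?_cons_of_neg (by simp [hxa, hxb])]
        rw [ih ka' kb' hka' hkb']
        by_cases hc : ka' ≤ kb'
        · rw [if_pos hc, if_pos (by omega)]
        · rw [if_neg hc, if_neg (by omega)]

-- scan with last-appended value prev on an all-equal remainder keeps prev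
theorem pvScanConst (p : Int) (l : List Int) (prev : Option Int)
    (h : ∀ e ∈ l, |p - e| ≤ 0) : (pvAScan p (0, prev) l).2 = prev := by
  unfold pvAScan
  rw [pvScan_all_le p l 0 prev h]

-- scan picks exactly the (unique-valued) achiever w of the maximal difference D
theorem pvScanPick (p D : Int) (l : List Int) (w : Int) (prev : Option Int)
    (hD : 0 < D) (hbound : ∀ e ∈ l, |p - e| ≤ D)
    (hach : ∀ e ∈ l, (|p - e| == D) = (e == w)) (hw : w ∈ l) :
    (pvAScan p (0, prev) l).2 = some w := by
  unfold pvAScan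
  rw [pvScan_find p D l 0 prev hD hbound
    ⟨w, hw, beq_iff_eq.mp (by rw [hach w hw]; simp)⟩]
  rw [pvFind_congr l hach, pvFind_self w l hw]

theorem pvBeqCongr {x a y b : Int} (h : (x = a) ↔ (y = b)) : (x == a) = (y == b) := by
  by_cases hx : x = a
  · simp [hx, h.mp hx]
  · have hy : ¬ y = b := fun hy => hx (h.mpr hy)
    simp [hx, hy]

-- main simulation: with prev = the last appended value, A's loop interleaves the ends of the
-- sorted remaining segment; b = true means "last ≥ everything remaining" (pick low next).
theorem pvMain : ∀ (n : Nat) (rem seg : List Int) (last : Int) (b : Bool),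
    rem.length = n → rem.Perm seg → seg.Pairwise (· ≤ ·) →
    (b = true → ∀ x ∈ seg, x ≤ last) → (b = false → ∀ x ∈ seg, last ≤ x) →
    pvALoop n rem last (some last) = pvIlv seg b := by
  intro n
  induction n with
  | zero =>
    intro rem seg last b hlen hperm _ _ _
    have hrem : rem = [] := List.length_eq_zero_iff.mp hlen
    subst hrem
    have hseg : seg = [] := hperm.symm.eq_nil
    subst hseg
    simp [pvALoop, pvIlv]
  | succ n ih =>
    intro rem seg last b hlen hperm hpw hbt hbf
    cases b with
    | true =>
      cases seg with
      | nil =>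
        have : rem = [] := hperm.eq_nil
        subst this; simp at hlen
      | cons m s =>
        have hle : ∀ x ∈ m :: s, x ≤ last := hbt rfl
        have hms : ∀ x ∈ s, m ≤ x := (List.pairwise_cons.mp hpw).1
        have hbnd : ∀ e ∈ rem, m ≤ e ∧ e ≤ last := by
          intro e he
          have hme : e ∈ m :: s := hperm.subset he
          refine ⟨?_, hle e hme⟩
          rcases List.mem_cons.mp hme with rfl | he'
          · exact le_refl _
          · exact hms e he'
        have hmrem : m ∈ rem := hperm.symm.subset (List.mem_cons_self)
        have hscan : (pvAScan last (0, some last) rem).2 = some m := by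
          by_cases hm : m = last
          · rw [pvScanConst last rem (some last) (by
              intro e he
              have hb := hbnd e he
              have : e = last := le_antisymm hb.2 (hm ▸ hb.1)
              simp [this])]
            rw [hm]
          · have hmlt : m < last := by
              have := (hbnd m hmrem).2
              omega
            exact pvScanPick last (last - m) rem m (some last) (by omega)
              (by intro e he
                  have hb := hbnd e he
                  rw [abs_of_nonneg (by omega)]
                  omega)
              (by intro e he
                  have hb := hbnd e he
                  rw [abs_of_nonneg (by omega)]
                  exact pvBeqCongr (by omega))
              hmrem
        simp only [pvALoop]
        rw [if_pos (show 0 < rem.length by omega)]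
        simp only [hscan, PySem.List.remove?_eq_some_erase rem m hmrem]
        rw [ih (rem.erase m) s m false
          (by rw [List.length_erase_of_mem hmrem, hlen]; omega)
          ((hperm.erase m).trans (by rw [List.erase_cons_head]))
          (List.pairwise_cons.mp hpw).2
          (fun h => nomatch h)
          (fun _ => hms)]
        simp [pvIlv]
    | false =>
      have hsegne : seg ≠ [] := by
        intro h
        subst h
        have : rem = [] := hperm.eq_nil
        subst this; simp at hlen
      set v := seg.getLastD 0 with hv
      have hvseg : v ∈ seg := pvGetLastD_mem seg hsegne
      have hvmax : ∀ x ∈ seg, x ≤ v := pvPw_le_last seg hpw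
      have hge : ∀ x ∈ seg, last ≤ x := hbf rfl
      have hbnd : ∀ e ∈ rem, last ≤ e ∧ e ≤ v := by
        intro e he
        have hme : e ∈ seg := hperm.subset he
        exact ⟨hge e hme, hvmax e hme⟩
      have hvrem : v ∈ rem := hperm.symm.subset hvseg
      have hscan : (pvAScan last (0, some last) rem).2 = some v := by
        by_cases hveq : v = last
        · rw [pvScanConst last rem (some last) (by
            intro e he
            have hb := hbnd e he
            have : e = last := le_antisymm (hveq ▸ hb.2) hb.1
            simp [this])]
          rw [hveq]
        · have hvlt : last < v := lt_of_le_of_ne (hbnd v hvrem).1 (fun h => hveq h.symm)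
          exact pvScanPick last (v - last) rem v (some last) (by omega)
            (by intro e he
                have hb := hbnd e he
                rw [abs_of_nonpos (by omega), neg_sub]
                omega)
            (by intro e he
                have hb := hbnd e he
                rw [abs_of_nonpos (by omega), neg_sub]
                exact pvBeqCongr (by omega))
            hvrem
      have hpermd : (rem.erase v).Perm seg.dropLast := by
        have h1 : seg.Perm (v :: seg.dropLast) := by
          conv_lhs => rw [← pvDropLast_concat seg hsegne]
          exact List.perm_append_singleton _ _
        have h2 := (hperm.trans h1).erase v
        rwa [List.erase_cons_head] at h2
      simp only [pvALoop]
      rw [if_pos (show 0 < rem.length by omega)]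
      simp only [hscan, PySem.List.remove?_eq_some_erase rem v hvrem]
      rw [ih (rem.erase v) seg.dropLast v true
        (by rw [List.length_erase_of_mem hvrem, hlen]; omega)
        hpermd
        (hpw.sublist (List.dropLast_sublist seg))
        (fun _ => fun x hx => hvmax x ((List.dropLast_sublist seg).subset hx))
        (fun h => nomatch h)]
      rw [pvIlv_false_eq seg hsegne, hv]

-- after the first pick of the remaining minimum m, A's loop yields the interleave of m :: s
theorem pvPickLo (n : Nat) (rest : List Int) (m : Int) (s : List Int)
    (hlen : rest.length = n + 1) (hperm : rest.Perm (m :: s))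
    (hpw : (m :: s).Pairwise (· ≤ ·)) :
    m :: pvALoop n (rest.erase m) m (some m) = pvIlv (m :: s) true := by
  have hm : m ∈ rest := hperm.symm.subset (List.mem_cons_self)
  rw [pvMain n (rest.erase m) s m false
    (by rw [List.length_erase_of_mem hm, hlen]; omega)
    ((hperm.erase m).trans (by rw [List.erase_cons_head]))
    (List.pairwise_cons.mp hpw).2
    (fun h => nomatch h)
    (fun _ => (List.pairwise_cons.mp hpw).1)]
  simp [pvIlv]

-- after the first pick of the remaining maximum, A's loop yields the reverse interleave
theorem pvPickHi (n : Nat) (rest t : List Int) (htne : t ≠ [])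
    (hlen : rest.length = n + 1) (hperm : rest.Perm t)
    (hpw : t.Pairwise (· ≤ ·)) :
    t.getLastD 0 :: pvALoop n (rest.erase (t.getLastD 0)) (t.getLastD 0) (some (t.getLastD 0))
      = pvIlv t false := by
  set v := t.getLastD 0 with hv
  have hvt : v ∈ t := pvGetLastD_mem t htne
  have hvrest : v ∈ rest := hperm.symm.subset hvt
  have hpermd : (rest.erase v).Perm t.dropLast := by
    have h1 : t.Perm (v :: t.dropLast) := by
      conv_lhs => rw [← pvDropLast_concat t htne]
      exact List.perm_append_singleton _ _
    have h2 := (hperm.trans h1).erase v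
    rwa [List.erase_cons_head] at h2
  rw [pvMain n (rest.erase v) t.dropLast v true
    (by rw [List.length_erase_of_mem hvrest, hlen]; omega)
    hpermd
    (hpw.sublist (List.dropLast_sublist t))
    (fun _ => fun x hx => pvPw_le_last t hpw x ((List.dropLast_sublist t).subset hx))
    (fun h => nomatch h)]
  rw [pvIlv_false_eq t htne, hv]

theorem pvBLoop_full (t : List Int) (lf : Bool) :
    pvBLoop t t.length 0 ((t.length : Int) - 1) lf = pvIlv t lf := by
  rw [pvBLoop_eq_ilv t.length t 0 ((t.length : Int) - 1) lf (by omega) (by omega) (by omega)]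
  have h1 : ((t.length : Int) - 1 + 1 - 0).toNat = t.length := by omega
  rw [h1]
  simp

theorem pvTop : ∀ (array : List Int), Pre_sort_peaks_and_valleys array →
    sort_peaks_and_valleys array = sort_peaks_and_valleys_alt array := by
  intro array hpre
  obtain ⟨hne, hpre2⟩ := hpre
  cases array with
  | nil => exact absurd rfl hne
  | cons h rest =>
    replace hpre2 : rest = [] ∨ ∃ x ∈ rest, x ≠ h := hpre2
    rcases hpre2 with hnil | hex
    · subst hnil
      rfl
    · have hrestne : rest ≠ [] := by rintro rfl; rcases hex with ⟨x, hx, _⟩; simp at hx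
      set t := PySem.List.sorted rest (fun x => x) false with ht
      have hpermt : rest.Perm t := (PySem.List.sorted_perm rest (fun x => x) false).symm
      have hpwt : t.Pairwise (· ≤ ·) := by
        have := PySem.List.sorted_pairwise rest (fun x => x)
        simpa [← ht] using this
      have htne : t ≠ [] := by
        rw [ht, Ne, PySem.List.sorted_eq_nil_iff]
        exact hrestne
      obtain ⟨m, s, hts⟩ := List.exists_cons_of_ne_nil htne
      have hhead : t.headI = m := by rw [hts]; rfl
      set v := t.getLastD 0 with hv
      have hmle : ∀ e ∈ rest, m ≤ e := by
        intro e he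
        have het : e ∈ t := hpermt.subset he
        rw [hts] at het
        rcases List.mem_cons.mp het with rfl | he'
        · exact le_refl _
        · exact (List.pairwise_cons.mp (hts ▸ hpwt)).1 e he'
      have hlev : ∀ e ∈ rest, e ≤ v := fun e he => pvPw_le_last t hpwt e (hpermt.subset he)
      have hmrest : m ∈ rest := hpermt.symm.subset (by rw [hts]; exact List.mem_cons_self)
      have hvrest : v ∈ rest := hpermt.symm.subset (pvGetLastD_mem t htne)
      have hmv : m ≤ v := hlev m hmrest
      set dlo := |h - m| with hdlo
      set dhi := |h - v| with hdhi
      have hbound : ∀ e ∈ rest, |h - e| ≤ max dlo dhi := by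
        intro e he
        rcases le_total e h with hc | hc
        · calc |h - e| = h - e := abs_of_nonneg (by omega)
            _ ≤ h - m := by have := hmle e he; omega
            _ ≤ |h - m| := le_abs_self _
            _ ≤ max dlo dhi := le_max_left _ _
        · calc |h - e| = e - h := by rw [abs_of_nonpos (by omega), neg_sub]
            _ ≤ v - h := by have := hlev e he; omega
            _ ≤ |h - v| := by rw [abs_sub_comm]; exact le_abs_self _
            _ ≤ max dlo dhi := le_max_right _ _
      obtain ⟨x, hx, hxh⟩ := hex
      have hDpos : 0 < max dlo dhi :=
        lt_of_lt_of_le (abs_pos.mpr (by omega : h - x ≠ (0 : Int))) (hbound x hx)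
      obtain ⟨n, hn⟩ : ∃ n, rest.length = n + 1 :=
        ⟨rest.length - 1, by have := List.length_pos_of_ne_nil hrestne; omega⟩
      have hRHS : sort_peaks_and_valleys_alt (h :: rest)
          = h :: pvIlv t ((decide (dhi < dlo)) || ((dlo == dhi) &&
              decide ((PySem.List.index? rest m).getD 0 ≤ (PySem.List.index? rest v).getD 0))) := by
        simp only [sort_peaks_and_valleys_alt]
        rw [← ht, if_neg htne, hhead, ← hv, ← hdlo, ← hdhi, pvBLoop_full t _]
      rw [hRHS]
      have hA : sort_peaks_and_valleys (h :: rest) = h :: pvALoop (n + 1) rest h none := by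
        rw [show sort_peaks_and_valleys (h :: rest) = h :: pvALoop rest.length rest h none from rfl, hn]
      rw [hA]
      simp only [pvALoop]
      rw [if_pos (show 0 < rest.length by omega)]
      rcases lt_trichotomy dhi dlo with hcmp | hcmp | hcmp
      · -- dhi < dlo: A picks the minimum m; B starts low
        have hmh : m < h := by
          by_contra hmh
          push_neg at hmh
          have h1 : dlo = m - h := by rw [hdlo, abs_of_nonpos (by omega), neg_sub]
          have h2 : v - h ≤ dhi := by rw [hdhi, abs_sub_comm]; exact le_abs_self _
          omega
        have hMax : max dlo dhi = dlo := max_eq_left (le_of_lt hcmp)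
        have hdloeq : dlo = h - m := by rw [hdlo, abs_of_nonneg (by omega)]
        have hach : ∀ e ∈ rest, (|h - e| == max dlo dhi) = (e == m) := by
          intro e he
          rcases le_total e h with hc | hc
          · rw [abs_of_nonneg (by omega), hMax]
            exact pvBeqCongr (by have := hmle e he; omega)
          · have h1 : |h - e| = e - h := by rw [abs_of_nonpos (by omega), neg_sub]
            have h2 : e - h ≤ v - h := by have := hlev e he; omega
            have h3 : v - h ≤ dhi := by rw [hdhi, abs_sub_comm]; exact le_abs_self _
            rw [h1, hMax]
            exact pvBeqCongr (by constructor <;> (intro; omega))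
        have hscan : (pvAScan h (0, none) rest).2 = some m :=
          pvScanPick h (max dlo dhi) rest m none hDpos hbound hach hmrest
        simp only [hscan, PySem.List.remove?_eq_some_erase rest m hmrest]
        rw [pvPickLo n rest m s hn (hts ▸ hpermt) (hts ▸ hpwt)]
        have hLF : ((decide (dhi < dlo)) || ((dlo == dhi) &&
            decide ((PySem.List.index? rest m).getD 0 ≤ (PySem.List.index? rest v).getD 0))) = true := by
          simp [hcmp]
        rw [hLF, hts]
      · -- dhi = dlo: tie, broken by earliest original index
        have hMax : max dlo dhi = dlo := by rw [hcmp, max_self]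
        by_cases hmveq : m = v
        · -- single remaining value: both pick m
          have hallm : ∀ e ∈ rest, e = m := fun e he =>
            le_antisymm (hmveq ▸ hlev e he) (hmle e he)
          have hach : ∀ e ∈ rest, (|h - e| == max dlo dhi) = (e == m) := by
            intro e he
            rw [hallm e he, hMax, hdlo]
            simp
          have hscan : (pvAScan h (0, none) rest).2 = some m :=
            pvScanPick h (max dlo dhi) rest m none hDpos hbound hach hmrest
          simp only [hscan, PySem.List.remove?_eq_some_erase rest m hmrest]
          rw [pvPickLo n rest m s hn (hts ▸ hpermt) (hts ▸ hpwt)]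
          have hLF : ((decide (dhi < dlo)) || ((dlo == dhi) &&
              decide ((PySem.List.index? rest m).getD 0 ≤ (PySem.List.index? rest v).getD 0))) = true := by
            simp [hcmp, ← hmveq]
          rw [hLF, hts]
        · have hmvlt : m < v := lt_of_le_of_ne hmv hmveq
          have hmhv : m < h ∧ h < v := by
            constructor
            · by_contra hc
              push_neg at hc
              have h1 : dlo = m - h := by rw [hdlo, abs_of_nonpos (by omega), neg_sub]
              have h2 : dhi = v - h := by rw [hdhi, abs_of_nonpos (by omega), neg_sub]
              omega
            · by_contra hc
              push_neg at hc
              have h1 : dlo = h - m := by rw [hdlo, abs_of_nonneg (by omega)]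
              have h2 : dhi = h - v := by rw [hdhi, abs_of_nonneg (by omega)]
              omega
          have h1 : dlo = h - m := by rw [hdlo, abs_of_nonneg (by omega)]
          have h2 : dhi = v - h := by rw [hdhi, abs_of_nonpos (by omega), neg_sub]
          obtain ⟨ka, hka⟩ := Option.isSome_iff_exists.mp
            ((PySem.List.index?_isSome_iff rest m).mpr hmrest)
          obtain ⟨kb, hkb⟩ := Option.isSome_iff_exists.mp
            ((PySem.List.index?_isSome_iff rest v).mpr hvrest)
          have hfc : rest.find? (fun e => |h - e| == max dlo dhi)
              = rest.find? (fun e => e == m || e == v) := by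
            apply pvFind_congr
            intro e he
            rcases le_total e h with hc | hc
            · rw [abs_of_nonneg (by omega), hMax]
              have hev : (e == v) = false := beq_eq_false_iff_ne.mpr (by omega)
              rw [hev, Bool.or_false]
              exact pvBeqCongr (by omega)
            · rw [show |h - e| = e - h from by rw [abs_of_nonpos (by omega), neg_sub], hMax]
              have hem : (e == m) = false := beq_eq_false_iff_ne.mpr (by omega)
              rw [hem, Bool.false_or]
              exact pvBeqCongr (by omega)
          have hscan : (pvAScan h (0, none) rest).2 = some (if ka ≤ kb then m else v) := by
            unfold pvAScan
            rw [pvScan_find h (max dlo dhi) rest 0 none hDpos hbound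
              ⟨m, hmrest, by rw [hMax, hdlo]⟩]
            simp only []
            rw [hfc, pvFind_two m v hmveq rest ka kb hka hkb]
          by_cases hk : ka ≤ kb
          · rw [if_pos hk] at hscan
            simp only [hscan, PySem.List.remove?_eq_some_erase rest m hmrest]
            rw [pvPickLo n rest m s hn (hts ▸ hpermt) (hts ▸ hpwt)]
            have hLF : ((decide (dhi < dlo)) || ((dlo == dhi) &&
                decide ((PySem.List.index? rest m).getD 0 ≤ (PySem.List.index? rest v).getD 0))) = true := by
              rw [hka, hkb]; simp [hcmp, hk]
            rw [hLF, hts]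
          · rw [if_neg hk] at hscan
            simp only [hscan, PySem.List.remove?_eq_some_erase rest v hvrest]
            rw [hv, pvPickHi n rest t htne hn hpermt hpwt]
            have hLF : ((decide (dhi < dlo)) || ((dlo == dhi) &&
                decide ((PySem.List.index? rest m).getD 0 ≤ (PySem.List.index? rest v).getD 0))) = false := by
              rw [hka, hkb]; simp [hcmp, hk]
            rw [hLF]
      · -- dlo < dhi: A picks the maximum v; B starts high
        have hvh : h < v := by
          by_contra hvh
          push_neg at hvh
          have h1 : dhi = h - v := by rw [hdhi, abs_of_nonneg (by omega)]
          have h2 : h - m ≤ dlo := by rw [hdlo]; exact le_abs_self _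
          omega
        have hMax : max dlo dhi = dhi := max_eq_right (le_of_lt hcmp)
        have hdhieq : dhi = v - h := by rw [hdhi, abs_of_nonpos (by omega), neg_sub]
        have hach : ∀ e ∈ rest, (|h - e| == max dlo dhi) = (e == v) := by
          intro e he
          rcases le_total e h with hc | hc
          · have hh1 : |h - e| = h - e := abs_of_nonneg (by omega)
            have hh2 : h - e ≤ h - m := by have := hmle e he; omega
            have hh3 : h - m ≤ dlo := by rw [hdlo]; exact le_abs_self _
            rw [hh1, hMax]
            exact pvBeqCongr (by constructor <;> (intro; omega))
          · rw [show |h - e| = e - h from by rw [abs_of_nonpos (by omega), neg_sub], hMax]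
            exact pvBeqCongr (by have := hlev e he; omega)
        have hscan : (pvAScan h (0, none) rest).2 = some v :=
          pvScanPick h (max dlo dhi) rest v none hDpos hbound hach hvrest
        simp only [hscan, PySem.List.remove?_eq_some_erase rest v hvrest]
        rw [hv, pvPickHi n rest t htne hn hpermt hpwt]
        have hLF : ((decide (dhi < dlo)) || ((dlo == dhi) &&
            decide ((PySem.List.index? rest m).getD 0 ≤ (PySem.List.index? rest v).getD 0))) = false := by
          have hh1 : ¬ dhi < dlo := by omega
          have hh2 : ¬ dlo = dhi := by omega
          simp [hh1, hh2]
        rw [hLF]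

-- ===== VERDICT (by name: the statement is the Claim_ definition above) =====
theorem sort_peaks_and_valleys_spec : Claim_equal_sort_peaks_and_valleys := by
  intro array _ hpre
  exact pvTop array hpre
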